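-- pv_equiv track=rewrite | github.com/primerch/gesp-exam-assessment | analyze_level4_v2.py | get_gesp_levels
-- ===== SOURCE A (Python) =====
-- def get_gesp_levels(points):
--     """Get GESP levels covered by knowledge points"""
--     levels = set()
--     for p in points:
--         if p.startswith("l7_"):
--             levels.add(7)
--         elif p.startswith("l8_"):
--             levels.add(8)
--     return sorted(list(levels))
-- ===== SOURCE B (Python) =====
-- def get_gesp_levels(points):
--     has7 = any([p.startswith("l7_") for p in points])
--     has8 = any([p.startswith("l8_") for p in points])
--     return ([7] if has7 else []) + ([8] if has8 else [])
-- ===== Notes on version B (the rewrite author's own statement) =====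
-- stated objective: simpler
-- what changed: Replaces the single set-accumulating loop plus sort with two independent full any()-scans for the l7_/l8_ prefixes, concatenating [7] and [8] directly in sorted order with no set and no sort.
import Mathlib
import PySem

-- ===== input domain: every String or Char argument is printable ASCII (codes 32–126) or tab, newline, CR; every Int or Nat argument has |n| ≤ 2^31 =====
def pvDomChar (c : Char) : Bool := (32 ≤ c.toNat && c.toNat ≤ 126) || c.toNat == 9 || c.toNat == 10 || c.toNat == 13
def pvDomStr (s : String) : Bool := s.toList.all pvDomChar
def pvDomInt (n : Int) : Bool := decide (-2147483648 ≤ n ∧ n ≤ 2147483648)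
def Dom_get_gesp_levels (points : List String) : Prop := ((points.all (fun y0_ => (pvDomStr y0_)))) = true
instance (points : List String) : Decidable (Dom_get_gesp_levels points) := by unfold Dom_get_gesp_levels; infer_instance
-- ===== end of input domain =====

-- B is a different decomposition: two independent any()-scans instead of A's set-accumulating loop + sort.

-- ===== PORT A =====
def get_gesp_levels (points : List String) : List Int :=
  let levels : PySem.Set Int :=
    points.foldl (fun (levels : PySem.Set Int) p =>
      if PySem.Str.startswith p "l7_" then levels.add 7
      else if PySem.Str.startswith p "l8_" then levels.add 8
      else levels) PySem.Set.empty
  PySem.List.sorted levels (fun x => x) false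

-- ===== PORT B =====
def get_gesp_levels_alt (points : List String) : List Int :=
  let has7 := (points.map (fun p => PySem.Str.startswith p "l7_")).any (fun b => b)
  let has8 := (points.map (fun p => PySem.Str.startswith p "l8_")).any (fun b => b)
  (if has7 then [(7 : Int)] else []) ++ (if has8 then [(8 : Int)] else [])

-- ===== PRECONDITION & SPEC =====
def Spec_get_gesp_levels (points : List String) (out : List Int) : Prop := out = get_gesp_levels_alt points
instance (points : List String) (out : List Int) : Decidable (Spec_get_gesp_levels points out) := by unfold Spec_get_gesp_levels; infer_instance

-- ===== CLAIM (what is proved, stated in full; the proofs are below) =====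
def Claim_equal_get_gesp_levels : Prop := ∀ (points : List String), Dom_get_gesp_levels points → Spec_get_gesp_levels points (get_gesp_levels points)

-- ===== LEMMAS AND PROOFS =====

-- A string cannot start with both "l7_" and "l8_".
theorem not_both_prefixes (p : String) (h7 : PySem.Str.startswith p "l7_" = true) :
    PySem.Str.startswith p "l8_" = false := by
  by_contra h
  rw [Bool.not_eq_false] at h
  rw [PySem.Str.startswith_eq, PySem.Chars.startswith_iff] at h7 h
  rcases List.prefix_or_prefix_of_prefix h7 h with hp | hp
  · have := hp.eq_of_length (by decide)
    simp at this
  · have := hp.eq_of_length (by decide)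
    simp at this

-- Invariant for A's loop: over the five reachable set states, the sorted loop result
-- is [7]/[8] segments governed by "already in the set OR some later point has the prefix".
theorem loopA_char (points : List String) (s : List Int)
    (hs : s = [] ∨ s = [7] ∨ s = [8] ∨ s = [7, 8] ∨ s = [8, 7]) :
    PySem.List.sorted
      (points.foldl (fun (levels : PySem.Set Int) p =>
        if PySem.Str.startswith p "l7_" then levels.add 7
        else if PySem.Str.startswith p "l8_" then levels.add 8
        else levels) s) (fun x => x) false
    = (if ((7 : Int) ∈ s) ∨ points.any (fun p => PySem.Str.startswith p "l7_") then [(7 : Int)] else [])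
      ++ (if ((8 : Int) ∈ s) ∨ points.any (fun p => PySem.Str.startswith p "l8_") then [(8 : Int)] else []) := by
  induction points generalizing s with
  | nil =>
      rcases hs with rfl | rfl | rfl | rfl | rfl <;> decide
  | cons p rest ih =>
      simp only [List.foldl_cons, List.any_cons]
      by_cases h7 : PySem.Str.startswith p "l7_" = true
      · have h8 := not_both_prefixes p h7
        simp only [h7, if_true, Bool.true_or]
        have hstate : PySem.Set.add s 7 = [7] ∨ PySem.Set.add s 7 = [8, 7] ∨
            PySem.Set.add s 7 = [7, 8] := by
          rcases hs with rfl | rfl | rfl | rfl | rfl <;> simp [PySem.Set.add]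
        have h7mem : (7 : Int) ∈ PySem.Set.add s 7 := by
          rcases hstate with h | h | h <;> simp [h]
        have h8mem : ((8 : Int) ∈ PySem.Set.add s 7) ↔ ((8 : Int) ∈ s) := by
          rcases hs with rfl | rfl | rfl | rfl | rfl <;> simp [PySem.Set.add]
        rw [ih (PySem.Set.add s 7) (by tauto)]
        rw [PySem.Str.startswith_eq, show "l8_".toList = ['l','8','_'] from rfl] at h8
        simp [h7mem, h8mem, h8]
      · rw [Bool.not_eq_true] at h7
        by_cases h8 : PySem.Str.startswith p "l8_" = true
        · simp only [h7, h8, if_true, Bool.false_or, Bool.true_or, Bool.false_eq_true, if_false]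
          have hstate : PySem.Set.add s 8 = [8] ∨ PySem.Set.add s 8 = [7, 8] ∨
              PySem.Set.add s 8 = [8, 7] := by
            rcases hs with rfl | rfl | rfl | rfl | rfl <;> simp [PySem.Set.add]
          have h8mem : (8 : Int) ∈ PySem.Set.add s 8 := by
            rcases hstate with h | h | h <;> simp [h]
          have h7mem : ((7 : Int) ∈ PySem.Set.add s 8) ↔ ((7 : Int) ∈ s) := by
            rcases hs with rfl | rfl | rfl | rfl | rfl <;> simp [PySem.Set.add]
          rw [ih (PySem.Set.add s 8) (by tauto)]
          simp [h7mem, h8mem]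
        · rw [Bool.not_eq_true] at h8
          simp only [h7, h8, Bool.false_eq_true, if_false, Bool.false_or]
          rw [ih s hs]

-- ===== VERDICT (by name: the statement is the Claim_ definition above) =====
theorem get_gesp_levels_spec : Claim_equal_get_gesp_levels := by
  intro points _
  unfold Spec_get_gesp_levels get_gesp_levels get_gesp_levels_alt
  rw [loopA_char points PySem.Set.empty (Or.inl rfl)]
  simp [PySem.Set.empty, List.any_map, Function.comp]
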